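-- pv_equiv track=rewrite | github.com/ytsaurus/ytsaurus | yt/admin/ytsaurus_ci/compatibility_graph.py | _extract_versions_from_constraint
-- ===== SOURCE A (Python) =====
-- def _extract_versions_from_constraint(constraint):
--     if constraint is None:
--         return []
--     if isinstance(constraint, list):
--         return [str(v) for v in constraint]
--     if not isinstance(constraint, str):
--         return [str(constraint)]
--     if "&&" in constraint:
--         versions = []
--         parts = [p.strip() for p in constraint.split("&&")]
--         for part in parts:
--             versions.extend(_extract_versions_from_constraint(part))
--         return versions
--     if constraint.startswith(">=") or constraint.startswith("<="):
--         return [constraint[2:].strip()]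
--     if constraint.startswith(">") or constraint.startswith("<"):
--         return [constraint[1:].strip()]
--     return [constraint]
-- ===== SOURCE B (Python) =====
-- def _strip_bound(part):
--     if part[:2] in (">=", "<="):
--         return part[2:].strip()
--     if part[:1] in (">", "<"):
--         return part[1:].strip()
--     return part
--
--
-- def _extract_versions_from_constraint(constraint):
--     if constraint is None:
--         return []
--     if isinstance(constraint, list):
--         return [str(v) for v in constraint]
--     if not isinstance(constraint, str):
--         return [str(constraint)]
--     parts = constraint.split("&&")
--     if len(parts) > 1:
--         parts = [p.strip() for p in parts]
--     return [_strip_bound(p) for p in parts]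
-- ===== Notes on version B (the rewrite author's own statement) =====
-- stated objective: simpler
-- what changed: A's recursive fan-out (self-call on every stripped part of the '&&'-split) is replaced by a single split followed by one flat map of a prefix-slicing helper over the parts, with no recursion.
import Mathlib
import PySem

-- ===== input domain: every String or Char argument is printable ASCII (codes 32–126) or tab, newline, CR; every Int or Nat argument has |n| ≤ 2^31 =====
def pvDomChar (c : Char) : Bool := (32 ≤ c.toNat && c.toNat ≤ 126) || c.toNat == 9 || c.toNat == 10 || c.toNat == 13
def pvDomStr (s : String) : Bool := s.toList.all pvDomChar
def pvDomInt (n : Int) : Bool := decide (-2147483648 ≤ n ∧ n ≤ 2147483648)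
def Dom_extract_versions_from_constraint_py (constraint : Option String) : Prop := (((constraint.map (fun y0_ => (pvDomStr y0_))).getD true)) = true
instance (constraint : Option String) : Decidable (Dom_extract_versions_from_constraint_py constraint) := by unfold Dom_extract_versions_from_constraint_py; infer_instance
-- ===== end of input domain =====

-- B flattens A's recursive fan-out into one pass: split on "&&" once and map a prefix-slicing
-- helper over the parts (objective: simpler; the list/non-str branches of the Python are
-- unreachable under the Option String type and are not ported).

-- ===== PORT A =====
-- Python A recurses on the stripped parts of constraint.split("&&"); a part of a split never
-- contains "&&" (proved below as splitOn_part_not_infix), so the recursion depth is at most 2: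
-- fuel 2 makes this structural recursion compute exactly what A computes.
def extractA_go (fuel : Nat) (s : String) : List String :=
  match fuel with
  | 0 => []
  | fuel + 1 =>
    if PySem.Str.isIn "&&" s then
      -- versions = []; parts = [p.strip() for p in constraint.split("&&")]; for part: versions.extend(rec(part))
      (((PySem.Str.split? s "&&").getD []).map PySem.Str.strip).foldl
        (fun acc p => acc ++ extractA_go fuel p) []
    else if PySem.Str.startswith s ">=" || PySem.Str.startswith s "<=" then
      [PySem.Str.strip (PySem.Str.slice s (some 2) none)]
    else if PySem.Str.startswith s ">" || PySem.Str.startswith s "<" then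
      [PySem.Str.strip (PySem.Str.slice s (some 1) none)]
    else [s]

def extract_versions_from_constraint_py (constraint : Option String) : List String :=
  match constraint with
  | none => []
  | some s => extractA_go 2 s

-- ===== PORT B =====
-- part[:2] in (">=", "<=") / part[:1] in (">", "<") of Source B, with the same 2-then-1 slicing
def strip_bound (p : String) : String :=
  if PySem.Str.slice p none (some 2) == ">=" || PySem.Str.slice p none (some 2) == "<=" then
    PySem.Str.strip (PySem.Str.slice p (some 2) none)
  else if PySem.Str.slice p none (some 1) == ">" || PySem.Str.slice p none (some 1) == "<" then
    PySem.Str.strip (PySem.Str.slice p (some 1) none)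
  else p

def extract_versions_from_constraint_py_alt (constraint : Option String) : List String :=
  match constraint with
  | none => []
  | some s =>
    let parts := (PySem.Str.split? s "&&").getD []   -- sep "&&" ≠ "", so split? is never none
    let parts := if 1 < parts.length then parts.map PySem.Str.strip else parts
    parts.map strip_bound

-- ===== PRECONDITION & SPEC =====
def Spec_extract_versions_from_constraint_py (constraint : Option String) (out : List String) : Prop := out = extract_versions_from_constraint_py_alt constraint
instance (constraint : Option String) (out : List String) : Decidable (Spec_extract_versions_from_constraint_py constraint out) := by unfold Spec_extract_versions_from_constraint_py; infer_instance

-- ===== CLAIM (what is proved, stated in full; the proofs are below) =====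
def Claim_equal_extract_versions_from_constraint_py : Prop := ∀ (constraint : Option String), Dom_extract_versions_from_constraint_py constraint → Spec_extract_versions_from_constraint_py constraint (extract_versions_from_constraint_py constraint)

-- ===== LEMMAS AND PROOFS =====

-- splitOn.go returns at least one part more than acc already holds
theorem go_length (sep : List Char) (fuel : Nat) (l cur : List Char) (acc : List (List Char)) :
    acc.length + 1 ≤ (PySem.Chars.splitOn.go sep fuel l cur acc).length := by
  induction fuel generalizing l cur acc with
  | zero => simp [PySem.Chars.splitOn.go]
  | succ fuel ih =>
    cases l with
    | nil => simp [PySem.Chars.splitOn.go]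
    | cons c rest =>
      simp only [PySem.Chars.splitOn.go]
      split
      · have h := ih (List.drop sep.length (c :: rest)) [] (cur.reverse :: acc)
        simp at h ⊢; omega
      · exact ih rest (c :: cur) acc

-- the scan invariant on cur forbids any separator occurrence inside cur
theorem clean_of_inv (sep cur l' : List Char) (hsep : sep ≠ [])
    (hcur : ∀ v, v <:+ cur → v ≠ [] → ¬ sep <+: (v ++ l')) : ¬ sep <:+: cur := by
  rintro ⟨u, w, huw⟩
  exact hcur (sep ++ w) ⟨u, by rw [← huw]; simp⟩ (by simp [hsep]) ⟨w ++ l', by simp⟩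

-- every part emitted by splitOn.go is free of the separator, given the scan invariant on cur
theorem go_part_not_infix (sep : List Char) (hsep : sep ≠ []) (fuel : Nat) (l cur : List Char)
    (acc : List (List Char)) (hfuel : l.length + 1 ≤ fuel)
    (hcur : ∀ v, v <:+ cur.reverse → v ≠ [] → ¬ sep <+: (v ++ l))
    (hacc : ∀ p ∈ acc, ¬ sep <:+: p) :
    ∀ p ∈ PySem.Chars.splitOn.go sep fuel l cur acc, ¬ sep <:+: p := by
  induction fuel generalizing l cur acc with
  | zero => omega
  | succ fuel ih =>
    have hclean : ¬ sep <:+: cur.reverse := clean_of_inv sep cur.reverse l hsep hcur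
    cases l with
    | nil =>
      simp only [PySem.Chars.splitOn.go]
      intro p hp
      simp at hp
      rcases hp with hp | hp
      · exact hacc p hp
      · exact hp ▸ hclean
    | cons c rest =>
      simp only [PySem.Chars.splitOn.go]
      split
      · rename_i hpre
        have hsl : 1 ≤ sep.length := by
          cases sep with | nil => exact absurd rfl hsep | cons _ _ => simp
        have hle : sep.length ≤ (c :: rest).length :=
          (List.isPrefixOf_iff_prefix.mp hpre).length_le
        refine ih (List.drop sep.length (c :: rest)) [] (cur.reverse :: acc) ?_ ?_ ?_
        · simp at hfuel ⊢; omega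
        · intro v hv hne; simp at hv; exact absurd hv hne
        · intro p hp
          rcases List.mem_cons.mp hp with hp | hp
          · exact hp ▸ hclean
          · exact hacc p hp
      · rename_i hnpre
        refine ih rest (c :: cur) acc (by simp at hfuel ⊢; omega) ?_ hacc
        intro v' hv' hne
        simp only [List.reverse_cons] at hv'
        rcases List.suffix_concat_iff.mp hv' with h1 | ⟨v, hveq, hvsuf⟩
        · exact absurd h1 hne
        · subst hveq
          by_cases hvnil : v = []
        -- the failed isPrefixOf test is exactly the v = [] case
          · subst hvnil
            simpa using fun hp => hnpre (List.isPrefixOf_iff_prefix.mpr hp)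
          · simpa using hcur v hvsuf hvnil

-- if the separator does not occur, splitOn.go keeps scanning to the end
theorem go_no_occurrence (sep : List Char) (fuel : Nat) (l cur : List Char)
    (acc : List (List Char)) (hfuel : l.length + 1 ≤ fuel) (h : ¬ sep <:+: l) :
    PySem.Chars.splitOn.go sep fuel l cur acc = ((cur.reverse ++ l) :: acc).reverse := by
  induction fuel generalizing l cur acc with
  | zero => omega
  | succ fuel ih =>
    cases l with
    | nil => simp [PySem.Chars.splitOn.go]
    | cons c rest =>
      simp only [PySem.Chars.splitOn.go]
      have hpre : sep.isPrefixOf (c :: rest) = false := by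
        by_contra hb
        exact h (List.IsPrefix.isInfix (List.isPrefixOf_iff_prefix.mp (by simpa using hb)))
      rw [if_neg (by simp [hpre])]
      rw [ih rest (c :: cur) acc (by simp at hfuel ⊢; omega)
        (fun hi => h (hi.trans (List.infix_cons_iff.mpr (Or.inr (List.infix_refl rest)))))]
      simp

-- if the separator occurs, splitOn.go emits at least two more parts than acc holds
theorem go_occurrence_length (sep : List Char) (hsep : sep ≠ []) (fuel : Nat) (l cur : List Char)
    (acc : List (List Char)) (hfuel : l.length + 1 ≤ fuel) (h : sep <:+: l) :
    acc.length + 2 ≤ (PySem.Chars.splitOn.go sep fuel l cur acc).length := by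
  induction fuel generalizing l cur acc with
  | zero => omega
  | succ fuel ih =>
    cases l with
    | nil => simp at h; exact absurd h hsep
    | cons c rest =>
      simp only [PySem.Chars.splitOn.go]
      split
      · have h2 := go_length sep fuel (List.drop sep.length (c :: rest)) [] (cur.reverse :: acc)
        simp at h2 ⊢; omega
      · rename_i hnp
        rcases List.infix_cons_iff.mp h with hp | hi
        · exact absurd (by simpa using List.isPrefixOf_iff_prefix.mpr hp) (by simpa using hnp)
        · exact ih rest (c :: cur) acc (by simp at hfuel ⊢; omega) hi

theorem splitOn_part_not_infix (sep : List Char) (hsep : sep ≠ []) (s : List Char) :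
    ∀ p ∈ PySem.Chars.splitOn s sep, ¬ sep <:+: p := by
  apply go_part_not_infix sep hsep (s.length + 1) s [] [] (le_refl _)
  · intro v hv hne; simp at hv; exact absurd hv hne
  · intro p hp; simp at hp

theorem splitOn_no_occurrence (sep : List Char) (s : List Char)
    (h : ¬ sep <:+: s) : PySem.Chars.splitOn s sep = [s] := by
  unfold PySem.Chars.splitOn
  rw [go_no_occurrence sep (s.length + 1) s [] [] (le_refl _) h]; simp

theorem splitOn_occurrence_length (sep : List Char) (hsep : sep ≠ []) (s : List Char)
    (h : sep <:+: s) : 2 ≤ (PySem.Chars.splitOn s sep).length := by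
  have := go_occurrence_length sep hsep (s.length + 1) s [] [] (le_refl _) h
  simpa [PySem.Chars.splitOn] using this

theorem strip_infix (cs : List Char) : PySem.Chars.strip cs <:+: cs := by
  have h1 : PySem.Chars.lstrip cs <:+ cs := List.dropWhile_suffix _
  have h2 : PySem.Chars.rstrip (PySem.Chars.lstrip cs) <+: PySem.Chars.lstrip cs := by
    rw [← List.reverse_suffix]
    simpa [PySem.Chars.rstrip] using
      List.dropWhile_suffix (l := (PySem.Chars.lstrip cs).reverse) PySem.Chars.isspace
  exact (PySem.Chars.strip cs).infix_refl.trans (h2.isInfix.trans h1.isInfix)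

theorem not_infix_strip (sep cs : List Char) (h : ¬ sep <:+: cs) :
    ¬ sep <:+: PySem.Chars.strip cs := fun hi => h (hi.trans (strip_infix cs))

-- String == compares the character lists
theorem string_beq_toList (a b : String) : (a == b) = (a.toList == b.toList) := by
  cases a; cases b; simp [String.ext_iff]

-- part[:n] == t (t of length n) is Python startswith for a pattern of that length
theorem slice_beq_startswith (p t : String) (k : Int) (hk : 0 ≤ k)
    (hlen : t.toList.length = k.toNat) :
    (PySem.Str.slice p none (some k) == t) = PySem.Chars.startswith p.toList t.toList := by
  rw [string_beq_toList]
  simp only [PySem.Str.toList_slice, PySem.Chars.slice_eq_listSlice,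
    PySem.List.slice_to p.toList hk]
  rw [Bool.eq_iff_iff]
  simp only [beq_iff_eq, PySem.Chars.startswith, List.isPrefixOf_iff_prefix,
    List.prefix_iff_eq_take, ← hlen]
  constructor
  · intro h; exact h.symm
  · intro h; exact h.symm

-- on a part with no "&&", one step of A's recursion is exactly B's strip_bound
theorem go_one_eq (fuel : Nat) (p : String) (h : ¬ ['&','&'] <:+: p.toList) :
    extractA_go (fuel + 1) p = [strip_bound p] := by
  have hin : PySem.Str.isIn "&&" p = false := by
    simp only [PySem.Str.isIn]; exact (PySem.Chars.isIn_eq_false_iff _ _).mpr h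
  unfold extractA_go strip_bound
  rw [hin]
  simp only [Bool.false_eq_true, if_false]
  rw [slice_beq_startswith p ">=" 2 (by norm_num) rfl,
    slice_beq_startswith p "<=" 2 (by norm_num) rfl,
    slice_beq_startswith p ">" 1 (by norm_num) rfl,
    slice_beq_startswith p "<" 1 (by norm_num) rfl]
  have e1 : PySem.Str.startswith p ">=" = PySem.Chars.startswith p.toList ">=".toList := rfl
  have e2 : PySem.Str.startswith p "<=" = PySem.Chars.startswith p.toList "<=".toList := rfl
  have e3 : PySem.Str.startswith p ">" = PySem.Chars.startswith p.toList ">".toList := rfl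
  have e4 : PySem.Str.startswith p "<" = PySem.Chars.startswith p.toList "<".toList := rfl
  rw [e1, e2, e3, e4]
  split_ifs <;> rfl

theorem split_getD (s : String) :
    (PySem.Str.split? s "&&").getD [] =
      (PySem.Chars.splitOn s.toList ['&','&']).map String.ofList := by
  simp [PySem.Str.split?, PySem.Chars.split?]

-- a loop whose body appends a singleton per element is a map
theorem flatMap_singleton_of_mem (l : List String) (g : String → List String)
    (f : String → String) (h : ∀ p ∈ l, g p = [f p]) : l.flatMap g = l.map f := by
  induction l with
  | nil => rfl
  | cons x xs ih =>
    simp only [List.flatMap_cons, List.map_cons, h x (by simp),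
      ih (fun p hp => h p (by simp [hp]))]
    rfl

-- ===== VERDICT (by name: the statement is the Claim_ definition above) =====
theorem extract_versions_from_constraint_py_spec : Claim_equal_extract_versions_from_constraint_py := by
  intro constraint _
  unfold Spec_extract_versions_from_constraint_py
  cases constraint with
  | none => rfl
  | some s =>
    show extractA_go 2 s = _
    simp only [extract_versions_from_constraint_py_alt]
    rw [split_getD]
    by_cases h : ['&','&'] <:+: s.toList
    · -- "&&" occurs: A folds its recursion over the stripped parts, B maps strip_bound over them
      have hin : PySem.Str.isIn "&&" s = true := by
        simp only [PySem.Str.isIn]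
        rw [show ("&&" : String).toList = ['&','&'] from rfl]
        exact (PySem.Chars.isIn_iff_infix _ _).mpr h
      have hlen : 2 ≤ (PySem.Chars.splitOn s.toList ['&','&']).length :=
        splitOn_occurrence_length ['&','&'] (by simp) s.toList h
      unfold extractA_go
      rw [hin, split_getD]
      simp only [if_pos (by simpa using hlen : 1 < ((PySem.Chars.splitOn s.toList ['&','&']).map String.ofList).length)]
      rw [PySem.List.foldl_append_eq_flatMap, List.nil_append]
      rw [flatMap_singleton_of_mem _ _ strip_bound ?_, List.map_map]
      · rfl
      · intro p hp
        simp only [List.mem_map] at hp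
        obtain ⟨q, hq, hqe⟩ := hp
        obtain ⟨r, hr, hre⟩ := hq
        have hrclean : ¬ ['&','&'] <:+: r := splitOn_part_not_infix ['&','&'] (by simp) s.toList r hr
        have hpl : p.toList = PySem.Chars.strip r := by
          rw [← hqe, ← hre]
          simp [PySem.Str.toList_strip]
        exact go_one_eq 0 p (by rw [hpl]; exact not_infix_strip _ _ hrclean)
    · -- no "&&": a single unstripped part, mapped through strip_bound
      have hsplit : PySem.Chars.splitOn s.toList ['&','&'] = [s.toList] :=
        splitOn_no_occurrence ['&','&'] s.toList h
      rw [go_one_eq 1 s h, hsplit]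
      simp [String.ofList_toList]
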